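-- pv_equiv track=rewrite | github.com/MixaKonan/google-foobar | 6.py | solution
-- ===== SOURCE A (Python) =====
-- def solution(start, length):
--     initial_length = length
--     value = 0
--     while length != 0:
--         for num in range(start, start + length):
--             value = value ^ num
--         start += initial_length
--         length -= 1
--
--     return value
-- ===== SOURCE B (Python) =====
-- def _pref(n):
--     # XOR of range(0, n) for n >= 0; XOR of range(n, 0) for n < 0.
--     if n >= 0:
--         r = n % 4
--         if r == 0:
--             return 0
--         elif r == 1:
--             return n - 1
--         elif r == 2:
--             return 1
--         else:
--             return n
--     m = -n
--     r = m % 4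
--     if r == 0:
--         g = 0
--     elif r == 1:
--         g = m - 1
--     elif r == 2:
--         g = 1
--     else:
--         g = m
--     return g if m % 2 == 0 else -g - 1
--
--
-- def solution(start, length):
--     total = 0
--     for i in range(length):
--         row = start + i * length
--         total ^= _pref(row) ^ _pref(row + length - i)
--     return total
-- ===== Notes on version B (the rewrite author's own statement) =====
-- stated objective: faster
-- what changed: Replaces the doubly-nested enumeration of every grid cell by one pass over the rows, computing each row's XOR in O(1) with a prefix-XOR closed form (n mod 4 table, extended to negative bounds via two's-complement symmetry); Pre_ only excludes length < 0, where A loops forever.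
import Mathlib
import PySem

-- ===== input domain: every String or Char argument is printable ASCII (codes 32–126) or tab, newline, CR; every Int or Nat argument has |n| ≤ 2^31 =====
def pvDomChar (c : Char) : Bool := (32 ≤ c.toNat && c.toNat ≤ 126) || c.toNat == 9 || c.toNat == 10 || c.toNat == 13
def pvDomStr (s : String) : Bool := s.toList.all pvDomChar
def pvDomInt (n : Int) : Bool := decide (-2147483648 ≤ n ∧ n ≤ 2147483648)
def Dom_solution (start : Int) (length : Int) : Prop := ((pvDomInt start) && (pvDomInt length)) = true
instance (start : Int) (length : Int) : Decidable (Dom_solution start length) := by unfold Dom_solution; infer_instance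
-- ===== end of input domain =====

-- B changes: one pass over the rows with an O(1) per-row prefix-XOR closed form (n mod 4
-- table, extended to negative bounds) instead of XORing every grid cell; objective: faster.

-- ===== PORT A =====
-- the while-loop of A; Python diverges when length < 0 (excluded by Pre_), so the guard is 0 < length
def solutionLoopA (initial : Int) (start : Int) (length : Int) (value : Int) : Int :=
  if _h : 0 < length then
    solutionLoopA initial (start + initial) (length - 1)
      ((PySem.List.pyRange start (start + length) 1).foldl PySem.Int.bxor value)
  else value
termination_by length.toNat
decreasing_by omega

def solution (start : Int) (length : Int) : Int :=
  solutionLoopA length start length 0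

-- ===== PORT B =====
-- _pref(n) of Source B: XOR of range(0,n) for n ≥ 0, XOR of range(n,0) for n < 0
def prefXor (n : Int) : Int :=
  if 0 ≤ n then
    (if PySem.Int.mod n 4 = 0 then 0
     else if PySem.Int.mod n 4 = 1 then n - 1
     else if PySem.Int.mod n 4 = 2 then 1
     else n)
  else
    let m := -n
    let g := if PySem.Int.mod m 4 = 0 then 0
             else if PySem.Int.mod m 4 = 1 then m - 1
             else if PySem.Int.mod m 4 = 2 then 1
             else m
    if PySem.Int.mod m 2 = 0 then g else -g - 1

def solution_alt (start : Int) (length : Int) : Int :=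
  (PySem.List.pyRange 0 length 1).foldl
    (fun total i =>
      PySem.Int.bxor total
        (PySem.Int.bxor (prefXor (start + i * length))
          (prefXor (start + i * length + length - i)))) 0

-- ===== PRECONDITION & SPEC =====
-- Pre_ excludes length < 0, on which Python A's while-loop never terminates (range is empty
-- and length only decreases), so A returns on exactly the inputs Pre_ admits.
def Pre_solution (start : Int) (length : Int) : Prop := 0 ≤ length
instance (start : Int) (length : Int) : Decidable (Pre_solution start length) := by
  unfold Pre_solution; infer_instance

def pvWitness_solution : Int × Int := (3, 4)

def Spec_solution (start : Int) (length : Int) (out : Int) : Prop := out = solution_alt start length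
instance (start : Int) (length : Int) (out : Int) : Decidable (Spec_solution start length out) := by
  unfold Spec_solution; infer_instance

-- ===== CLAIM (what is proved, stated in full; the proofs are below) =====
def Claim_equal_solution : Prop := ∀ (start : Int) (length : Int), Dom_solution start length → Pre_solution start length → Spec_solution start length (solution start length)

-- ===== LEMMAS AND PROOFS =====

-- bxor on the two sign shapes ↑m and -↑m-1 (two's complement)
lemma bxor_nn (m n : Nat) : PySem.Int.bxor (m : Int) (n : Int) = ((m ^^^ n : Nat) : Int) :=
  PySem.Int.bxor_natCast m n

lemma bxor_nneg (m n : Nat) : PySem.Int.bxor (m : Int) (-(n : Int) - 1) = -((m ^^^ n : Nat) : Int) - 1 := by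
  unfold PySem.Int.bxor
  rw [if_pos (Int.natCast_nonneg m), if_neg (by omega : ¬ (0 ≤ -(n : Int) - 1))]
  have e : -(-(n : Int) - 1) - 1 = (n : Int) := by ring
  rw [e, Int.toNat_natCast, Int.toNat_natCast]

lemma bxor_negn (m n : Nat) : PySem.Int.bxor (-(m : Int) - 1) (n : Int) = -((m ^^^ n : Nat) : Int) - 1 := by
  unfold PySem.Int.bxor
  rw [if_neg (by omega : ¬ (0 ≤ -(m : Int) - 1)), if_pos (Int.natCast_nonneg n)]
  have e : -(-(m : Int) - 1) - 1 = (m : Int) := by ring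
  rw [e, Int.toNat_natCast, Int.toNat_natCast]

lemma bxor_negneg (m n : Nat) : PySem.Int.bxor (-(m : Int) - 1) (-(n : Int) - 1) = ((m ^^^ n : Nat) : Int) := by
  unfold PySem.Int.bxor
  rw [if_neg (by omega : ¬ (0 ≤ -(m : Int) - 1)), if_neg (by omega : ¬ (0 ≤ -(n : Int) - 1))]
  have em : -(-(m : Int) - 1) - 1 = (m : Int) := by ring
  have en : -(-(n : Int) - 1) - 1 = (n : Int) := by ring
  rw [em, en, Int.toNat_natCast, Int.toNat_natCast]

lemma int_rep (a : Int) : (∃ m : Nat, a = (m : Int)) ∨ (∃ m : Nat, a = -(m : Int) - 1) := by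
  rcases (by omega : 0 ≤ a ∨ a < 0) with h | h
  · exact Or.inl ⟨a.toNat, by omega⟩
  · exact Or.inr ⟨(-a - 1).toNat, by omega⟩

lemma bxor_assoc (a b c : Int) :
    PySem.Int.bxor (PySem.Int.bxor a b) c = PySem.Int.bxor a (PySem.Int.bxor b c) := by
  rcases int_rep a with ⟨m, rfl⟩ | ⟨m, rfl⟩ <;>
    rcases int_rep b with ⟨n, rfl⟩ | ⟨n, rfl⟩ <;>
      rcases int_rep c with ⟨k, rfl⟩ | ⟨k, rfl⟩ <;>
        simp only [bxor_nn, bxor_nneg, bxor_negn, bxor_negneg, Nat.xor_assoc]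

lemma bxor_not (a b : Int) : PySem.Int.bxor (-a - 1) b = -(PySem.Int.bxor a b) - 1 := by
  rcases int_rep a with ⟨m, rfl⟩ | ⟨m, rfl⟩ <;>
    rcases int_rep b with ⟨n, rfl⟩ | ⟨n, rfl⟩
  · simp only [bxor_nn, bxor_negn]
  · simp only [bxor_nneg, bxor_negneg]; omega
  · have e : -(-(m : Int) - 1) - 1 = (m : Int) := by ring
    rw [e]; simp only [bxor_nn, bxor_negn]; omega
  · have e : -(-(m : Int) - 1) - 1 = (m : Int) := by ring
    rw [e]; simp only [bxor_nneg, bxor_negneg]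

lemma bxor_not_right (a b : Int) : PySem.Int.bxor a (-b - 1) = -(PySem.Int.bxor a b) - 1 := by
  rw [PySem.Int.bxor_comm, bxor_not, PySem.Int.bxor_comm]

lemma bxor_not_not (a b : Int) : PySem.Int.bxor (-a - 1) (-b - 1) = PySem.Int.bxor a b := by
  rw [bxor_not, bxor_not_right]; ring

lemma bxor_zero_left (a : Int) : PySem.Int.bxor 0 a = a := by
  rw [PySem.Int.bxor_comm]; exact PySem.Int.bxor_zero a

lemma bxor_cancel (a b : Int) : PySem.Int.bxor (PySem.Int.bxor a b) b = a := by
  rw [bxor_assoc, PySem.Int.bxor_self, PySem.Int.bxor_zero]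

lemma nat_two_mul_xor_one (m : Nat) : (2 * m) ^^^ 1 = 2 * m + 1 := by
  apply Nat.eq_of_testBit_eq
  intro i
  rcases i with _ | i <;> simp [Nat.testBit_succ, Nat.testBit_zero]

lemma nat_two_mul_xor_succ (m : Nat) : (2 * m) ^^^ (2 * m + 1) = 1 := by
  rw [← nat_two_mul_xor_one m, ← Nat.xor_assoc, Nat.xor_self, Nat.zero_xor]

lemma prefXor_of_nonneg (n : Int) (h : 0 ≤ n) :
    prefXor n = if n % 4 = 0 then 0 else if n % 4 = 1 then n - 1 else if n % 4 = 2 then 1 else n := by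
  unfold prefXor
  rw [if_pos h, PySem.Int.mod_eq_emod_of_pos (by omega : (0:Int) < 4)]

lemma prefXor_neg (n : Int) (h : n < 0) :
    prefXor n = if PySem.Int.mod (-n) 2 = 0 then prefXor (-n) else -(prefXor (-n)) - 1 := by
  unfold prefXor
  simp only [if_neg (show ¬ (0 ≤ n) by omega), if_pos (show (0:Int) ≤ -n by omega)]

-- the prefix function satisfies the XOR recurrence, first on nonneg inputs
lemma prefXor_step_nonneg (n : Int) (hn : 0 ≤ n) :
    prefXor (n + 1) = PySem.Int.bxor (prefXor n) n := by
  rw [prefXor_of_nonneg n hn, prefXor_of_nonneg (n + 1) (by omega)]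
  rcases (by omega : n % 4 = 0 ∨ n % 4 = 1 ∨ n % 4 = 2 ∨ n % 4 = 3) with h | h | h | h
  · have h' : (n + 1) % 4 = 1 := by omega
    simp only [h, h']
    norm_num [bxor_zero_left]
  · have h' : (n + 1) % 4 = 2 := by omega
    simp only [h, h']
    norm_num
    obtain ⟨t, rfl⟩ : ∃ t : Nat, n = 2 * (t : Int) + 1 := ⟨((n - 1) / 2).toNat, by omega⟩
    have e1 : 2 * (t : Int) + 1 - 1 = ((2 * t : Nat) : Int) := by push_cast; ring
    have e2 : 2 * (t : Int) + 1 = ((2 * t + 1 : Nat) : Int) := by push_cast; ring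
    rw [e1, e2, bxor_nn, nat_two_mul_xor_succ]
    norm_num
  · have h' : (n + 1) % 4 = 3 := by omega
    simp only [h, h']
    norm_num
    rw [PySem.Int.bxor_comm]
    obtain ⟨t, rfl⟩ : ∃ t : Nat, n = 2 * (t : Int) := ⟨(n / 2).toNat, by omega⟩
    have e1 : 2 * (t : Int) = ((2 * t : Nat) : Int) := by push_cast; ring
    have e2 : (1 : Int) = ((1 : Nat) : Int) := by norm_num
    rw [e2, e1, bxor_nn, nat_two_mul_xor_one]
    push_cast; ring
  · have h' : (n + 1) % 4 = 0 := by omega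
    simp only [h, h']
    norm_num [PySem.Int.bxor_self]

-- the recurrence on all integers (negative side via two's-complement symmetry)
lemma prefXor_step (n : Int) : prefXor (n + 1) = PySem.Int.bxor (prefXor n) n := by
  rcases (by omega : 0 ≤ n ∨ n = -1 ∨ n < -1) with hn | hn | hn
  · exact prefXor_step_nonneg n hn
  · subst hn
    have h1 : prefXor (-1 + 1) = 0 := by decide
    have h2 : prefXor (-1) = -1 := by decide
    rw [h1, h2, PySem.Int.bxor_self]
  · obtain ⟨k, rfl⟩ : ∃ k : Nat, n = -(k : Int) - 1 := ⟨(-n - 1).toNat, by omega⟩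
    have hk : 1 ≤ k := by omega
    have e0 : -(k : Int) - 1 + 1 = -(k : Int) := by ring
    rw [e0, prefXor_neg (-(k : Int)) (by omega), prefXor_neg (-(k : Int) - 1) (by omega)]
    have ek : - -(k : Int) = (k : Int) := by ring
    have ek1 : -(-(k : Int) - 1) = (k : Int) + 1 := by ring
    rw [ek, ek1]
    have hstep : prefXor ((k : Int) + 1) = PySem.Int.bxor (prefXor (k : Int)) (k : Int) :=
      prefXor_step_nonneg _ (Int.natCast_nonneg k)
    have hm2 : PySem.Int.mod (k : Int) 2 = (k : Int) % 2 :=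
      PySem.Int.mod_eq_emod_of_pos (by omega)
    have hm2' : PySem.Int.mod ((k : Int) + 1) 2 = ((k : Int) + 1) % 2 :=
      PySem.Int.mod_eq_emod_of_pos (by omega)
    rcases (by omega : (k : Int) % 2 = 0 ∨ (k : Int) % 2 = 1) with hk2 | hk2
    · rw [if_pos (by rw [hm2]; exact hk2), if_neg (by rw [hm2']; omega), hstep,
        bxor_not_not, bxor_cancel]
    · rw [if_neg (by rw [hm2]; omega), if_pos (by rw [hm2']; omega), hstep,
        bxor_not_right, bxor_cancel]

-- XOR of range(a, b) in terms of the prefix function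
lemma foldl_bxor_pyRange (a b v : Int) (h : a ≤ b) :
    (PySem.List.pyRange a b 1).foldl PySem.Int.bxor v
      = PySem.Int.bxor v (PySem.Int.bxor (prefXor a) (prefXor b)) := by
  obtain ⟨k, hk⟩ : ∃ k : Nat, b = a + (k : Int) := ⟨(b - a).toNat, by omega⟩
  subst hk
  clear h
  induction k generalizing v with
  | zero =>
      simp only [Nat.cast_zero, add_zero, PySem.List.pyRange_one_eq_nil (le_refl a),
        List.foldl_nil, PySem.Int.bxor_self, PySem.Int.bxor_zero]
  | succ k ih =>
      have e : a + ((k + 1 : Nat) : Int) = (a + (k : Int)) + 1 := by push_cast; ring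
      rw [e, PySem.List.pyRange_one_succ_right (by omega : a ≤ a + (k : Int)),
        List.foldl_append, ih, prefXor_step (a + (k : Int))]
      simp only [List.foldl_cons, List.foldl_nil]
      rw [bxor_assoc, bxor_assoc]

-- the common row recursion both programs compute
def rowsXor (L : Int) (s : Int) : Nat → Int
  | 0 => 0
  | k + 1 =>
      PySem.Int.bxor (PySem.Int.bxor (prefXor s) (prefXor (s + ((k : Int) + 1))))
        (rowsXor L (s + L) k)

lemma loopA_eq_rows (L : Int) (k : Nat) : ∀ (s v : Int),
    solutionLoopA L s (k : Int) v = PySem.Int.bxor v (rowsXor L s k) := by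
  induction k with
  | zero =>
      intro s v
      rw [solutionLoopA]
      simp [rowsXor, PySem.Int.bxor_zero]
  | succ k ih =>
      intro s v
      rw [solutionLoopA]
      rw [dif_pos (by push_cast; omega : (0:Int) < ((k + 1 : Nat) : Int))]
      have e : ((k + 1 : Nat) : Int) - 1 = (k : Int) := by push_cast; ring
      rw [e, ih]
      rw [foldl_bxor_pyRange s (s + ((k + 1 : Nat) : Int)) v (by push_cast; omega)]
      show _ = PySem.Int.bxor v (rowsXor L s (k + 1))
      rw [rowsXor]
      have e2 : s + ((k + 1 : Nat) : Int) = s + ((k : Int) + 1) := by push_cast; ring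
      rw [e2, bxor_assoc]

lemma foldB_eq_rows (start L : Int) (k : Nat) : ∀ (i t : Int), 0 ≤ i → i + (k : Int) = L →
    (PySem.List.pyRange i L 1).foldl
      (fun total j =>
        PySem.Int.bxor total
          (PySem.Int.bxor (prefXor (start + j * L))
            (prefXor (start + j * L + L - j)))) t
      = PySem.Int.bxor t (rowsXor L (start + i * L) k) := by
  induction k with
  | zero =>
      intro i t _ hiL
      rw [PySem.List.pyRange_one_eq_nil (by omega : L ≤ i), List.foldl_nil]
      simp [rowsXor, PySem.Int.bxor_zero]
  | succ k ih =>
      intro i t hi hiL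
      rw [PySem.List.pyRange_one_cons (by omega : i < L), List.foldl_cons,
        ih (i + 1) _ (by omega) (by push_cast at hiL ⊢; omega)]
      rw [rowsXor]
      have e1 : start + (i + 1) * L = start + i * L + L := by ring
      have e2 : start + i * L + L - i = start + i * L + ((k : Int) + 1) := by push_cast at hiL ⊢; omega
      rw [e1, e2, bxor_assoc]

-- ===== VERDICT (by name: the statement is the Claim_ definition above) =====
theorem solution_spec : Claim_equal_solution := by
  intro start length _ hpre
  have hpre' : (0:Int) ≤ length := hpre
  obtain ⟨k, rfl⟩ : ∃ k : Nat, length = (k : Int) := ⟨length.toNat, by omega⟩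
  unfold Spec_solution solution solution_alt
  rw [loopA_eq_rows, foldB_eq_rows start (k : Int) k 0 0 le_rfl (by omega),
    bxor_zero_left, bxor_zero_left]
  have e : start + 0 * (k : Int) = start := by ring
  rw [e]
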